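-- pv_equiv track=rewrite | github.com/mikegushchin333-create/labrep | lab1v2.py | calculate_rabbits
-- ===== SOURCE A (Python) =====
-- def calculate_rabbits(n, m):
--     rabbits = [0] * (n + 1)
--     rabbits[1] = 1
--     if n >= 2:
--         rabbits[2] = 1
--     for i in range(3, n + 1):
--         newborns = rabbits[i - 2]
--         rabbits[i] = rabbits[i - 1] + newborns
--         if i > m:
--             rabbits[i] -= rabbits[i - m - 1]
--     return rabbits[n]
-- ===== SOURCE B (Python) =====
-- def calculate_rabbits(n, m):
--     # Cohort bookkeeping instead of a population recurrence: `births` logs the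
--     # size of every cohort in birth order (a cohort lives m - 1 months, on top
--     # of the immortal initial pair), `total` is a running sum of the cohorts
--     # still alive, and `older`/`newer` hold the populations two months back and
--     # one month back (all pairs alive two months ago breed this month).
--     births = []
--     total = 0
--     older, newer = 1, 1
--     for _ in range(3, n + 1):
--         births.append(older)
--         total += older
--         if len(births) > m - 1:
--             total -= births[len(births) - m]   # cohort born m-1 months ago dies
--         older, newer = newer, 1 + total
--     return newer
-- ===== Notes on version B (the rewrite author's own statement) =====
-- stated objective: alternative
-- what changed: B drops A's month-indexed population array and its three-term recurrence F(i)=F(i-1)+F(i-2)-F(i-m-1); instead it simulates cohorts: a birth log (each cohort lives m-1 months on top of the immortal initial pair), a running sliding-window sum of the cohorts still alive, and a two-month population history supplying the breeders.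
-- outside the precondition, e.g. on calculate_rabbits(5, 0): A returns 1, B raises IndexError; on calculate_rabbits(5, -1): A returns 0, B raises IndexError
import Mathlib
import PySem

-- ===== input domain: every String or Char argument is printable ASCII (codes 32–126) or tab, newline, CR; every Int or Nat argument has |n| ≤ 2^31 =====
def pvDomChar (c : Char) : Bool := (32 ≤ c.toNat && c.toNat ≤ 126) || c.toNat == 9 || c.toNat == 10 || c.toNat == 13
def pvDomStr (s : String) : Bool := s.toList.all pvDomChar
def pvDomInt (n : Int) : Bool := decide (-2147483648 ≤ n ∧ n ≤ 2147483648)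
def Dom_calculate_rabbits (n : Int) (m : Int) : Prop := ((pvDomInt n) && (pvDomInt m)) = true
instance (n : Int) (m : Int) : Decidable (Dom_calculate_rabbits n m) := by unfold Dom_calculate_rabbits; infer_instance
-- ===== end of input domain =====

-- B simulates cohorts (a birth log, a running sliding-window sum of the cohorts still
-- alive, and a two-month population history) instead of A's month-indexed population
-- array with its three-term recurrence (objective: alternative).

-- ===== PORT A =====
def calculate_rabbits (n : Int) (m : Int) : Int :=
  let rabbits : List Int := List.replicate (n + 1).toNat 0
  let rabbits := PySem.List.pySetD rabbits 1 1
  let rabbits := if n ≥ 2 then PySem.List.pySetD rabbits 2 1 else rabbits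
  let rabbits := (PySem.List.pyRange 3 (n + 1) 1).foldl
    (fun r i =>
      let newborns := PySem.List.pyGetD r (i - 2) 0
      let v := PySem.List.pyGetD r (i - 1) 0 + newborns
      let v := if i > m then v - PySem.List.pyGetD r (i - m - 1) 0 else v
      PySem.List.pySetD r i v) rabbits
  PySem.List.pyGetD rabbits n 0

-- ===== PORT B =====
-- the loop body of B: state = (births, total, older, newer)
def pvBodyB (m : Int) (st : List Int × Int × Int × Int) (_ : Int) :
    List Int × Int × Int × Int :=
  let births := st.1 ++ [st.2.2.1]
  let total := st.2.1 + st.2.2.1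
  let total := if (births.length : Int) > m - 1
    then total - PySem.List.pyGetD births ((births.length : Int) - m) 0 else total
  (births, total, st.2.2.2, 1 + total)

def calculate_rabbits_alt (n : Int) (m : Int) : Int :=
  ((PySem.List.pyRange 3 (n + 1) 1).foldl (pvBodyB m)
    (([] : List Int), (0 : Int), (1 : Int), (1 : Int))).2.2.2

-- ===== PRECONDITION & SPEC =====
-- Pre_ excludes n < 1, where A raises IndexError, and m < 1, outside the natural domain of a
-- positive mortality window, where A's values (and IndexErrors for m ≤ -2, n ≥ 3) are
-- accidents of the `i > m` branch.
def Pre_calculate_rabbits (n : Int) (m : Int) : Prop := 1 ≤ n ∧ 1 ≤ m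
instance (n : Int) (m : Int) : Decidable (Pre_calculate_rabbits n m) := by unfold Pre_calculate_rabbits; infer_instance
def pvWitness_calculate_rabbits : Int × Int := (7, 3)

def Spec_calculate_rabbits (n : Int) (m : Int) (out : Int) : Prop := out = calculate_rabbits_alt n m
instance (n : Int) (m : Int) (out : Int) : Decidable (Spec_calculate_rabbits n m out) := by unfold Spec_calculate_rabbits; infer_instance

-- ===== CLAIM (what is proved, stated in full; the proofs are below) =====
def Claim_equal_calculate_rabbits : Prop := ∀ (n : Int) (m : Int), Dom_calculate_rabbits n m → Pre_calculate_rabbits n m → Spec_calculate_rabbits n m (calculate_rabbits n m)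

-- ===== LEMMAS AND PROOFS =====

-- Reference sequence: pvF m i = A's rabbits[i] (population of month i).
def pvF (m : Int) : Nat → Int
  | 0 => 0
  | 1 => 1
  | 2 => 1
  | k + 3 =>
    pvF m (k + 2) + pvF m (k + 1) -
      (if ((k : Int) + 3) > m then pvF m (k + 3 - (m.toNat + 1)) else 0)
  termination_by k => k
  decreasing_by all_goals omega

lemma pvF_eq (m : Int) (i : Nat) (hi : 3 ≤ i) :
    pvF m i = pvF m (i - 1) + pvF m (i - 2) -
      (if (i : Int) > m then pvF m (i - (m.toNat + 1)) else 0) := by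
  obtain ⟨k, rfl⟩ : ∃ k, i = k + 3 := ⟨i - 3, by omega⟩
  have h1 : k + 3 - 1 = k + 2 := by omega
  have h2 : k + 3 - 2 = k + 1 := by omega
  rw [pvF, h1, h2]
  push_cast
  rfl

-- A's array after having processed months < i.
def pvT (m : Int) (N : Nat) (i : Nat) : List Int :=
  (List.range (N + 1)).map (fun j => if j < i then pvF m j else 0)

-- B's cohort list after t loop iterations (months 3 .. t+2 processed).
def pvD (m : Int) (t : Nat) : List Int :=
  (List.range t).map (fun j => pvF m (t - j))

lemma pvD_succ (m : Int) (t : Nat) :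
    pvD m (t + 1) = pvF m (t + 1) :: pvD m t := by
  simp [pvD, List.range_succ_eq_map, List.map_map, Function.comp]

lemma pvD_length (m : Int) (t : Nat) : (pvD m t).length = t := by
  simp [pvD]

lemma pvD_take_sum (m : Int) (t K' : Nat) :
    ((pvD m t).take (K' + 1)).sum
      = ((pvD m t).take K').sum + (if K' + 1 ≤ t then pvF m (t - K') else 0) := by
  by_cases h : K' + 1 ≤ t
  · have hlt : K' < (pvD m t).length := by rw [pvD_length]; omega
    rw [List.take_add_one, List.getElem?_eq_getElem hlt]
    simp [pvD, h]
  · have hle : (pvD m t).length ≤ K' := by rw [pvD_length]; omega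
    rw [List.take_of_length_le hle, List.take_of_length_le (by omega)]
    simp [h]

-- the key identity: total population = 1 (initial pair) + living cohorts
lemma pvKey (m : Int) (hm : 1 ≤ m) (t : Nat) :
    pvF m (t + 2) = 1 + ((pvD m t).take (m.toNat - 1)).sum := by
  induction t with
  | zero => simp [pvF, pvD]
  | succ t ih =>
    rw [pvD_succ]
    by_cases hK : m.toNat - 1 = 0
    · -- m = 1: no cohort outlives its birth month, population is the initial pair alone
      have hm1 : m = 1 := by omega
      rw [hK, List.take_zero] at ih ⊢
      have he := pvF_eq m (t + 3) (by omega)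
      have hc : ((t + 3 : Nat) : Int) > m := by push_cast; omega
      rw [if_pos hc] at he
      have h1 : t + 3 - 1 = t + 2 := by omega
      have h2 : t + 3 - 2 = t + 1 := by omega
      have h3 : t + 3 - (m.toNat + 1) = t + 1 := by omega
      rw [h1, h2, h3] at he
      simpa [he] using ih
    · obtain ⟨K', hKm⟩ : ∃ K', m.toNat - 1 = K' + 1 := ⟨m.toNat - 2, by omega⟩
      rw [hKm] at ih ⊢
      rw [List.take_succ_cons, List.sum_cons]
      have hts := pvD_take_sum m t K'
      have he := pvF_eq m (t + 3) (by omega)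
      have h1 : t + 3 - 1 = t + 2 := by omega
      have h2 : t + 3 - 2 = t + 1 := by omega
      rw [h1, h2] at he
      by_cases hc : K' + 1 ≤ t
      · have hcond : ((t + 3 : Nat) : Int) > m := by push_cast; omega
        rw [if_pos hcond] at he
        have h3 : t + 3 - (m.toNat + 1) = t - K' := by omega
        rw [h3] at he
        rw [if_pos hc] at hts
        rw [show t + 1 + 2 = t + 3 from rfl, he, ih, hts]
        ring
      · rw [if_neg hc] at hts
        by_cases hc2 : t = K'
        · have hcond : ((t + 3 : Nat) : Int) > m := by push_cast; omega
          rw [if_pos hcond] at he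
          have h3 : t + 3 - (m.toNat + 1) = 0 := by omega
          rw [h3] at he
          rw [show t + 1 + 2 = t + 3 from rfl, he, ih, hts]
          simp [pvF]
          ring
        · have hcond : ¬ (((t + 3 : Nat) : Int) > m) := by push_cast; omega
          rw [if_neg hcond] at he
          rw [show t + 1 + 2 = t + 3 from rfl, he, ih, hts]
          ring

lemma pvD_reverse (m : Int) (t : Nat) :
    (pvD m t).reverse = (List.range t).map (fun j => pvF m (j + 1)) := by
  induction t with
  | zero => simp [pvD]
  | succ t ih =>
    rw [pvD_succ, List.reverse_cons, ih, List.range_succ, List.map_append]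
    simp

lemma pvT_get (m : Int) (N i j : Nat) (hj : j ≤ N) :
    PySem.List.pyGetD (pvT m N i) (j : Int) 0 = if j < i then pvF m j else 0 := by
  rw [PySem.List.pyGetD_natCast, pvT, PySem.List.getD_map_range _ _ _ _ (by omega)]

lemma pvT_set (m : Int) (N i : Nat) (hiN : i ≤ N) :
    (pvT m N i).set i (pvF m i) = pvT m N (i + 1) := by
  apply List.ext_getElem
  · simp [pvT]
  · intro j h1 h2
    have hjN : j < N + 1 := by simpa [pvT] using h2
    by_cases hji : j = i
    · subst hji
      simp [pvT]
    · simp [pvT, List.getElem_set]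
      omega

lemma stepA (m : Int) (hm : 1 ≤ m) (N i : Nat) (h3 : 3 ≤ i) (hiN : i ≤ N) :
    PySem.List.pySetD (pvT m N i) (i : Int)
      (if (i : Int) > m
        then PySem.List.pyGetD (pvT m N i) ((i : Int) - 1) 0 + PySem.List.pyGetD (pvT m N i) ((i : Int) - 2) 0
             - PySem.List.pyGetD (pvT m N i) ((i : Int) - m - 1) 0
        else PySem.List.pyGetD (pvT m N i) ((i : Int) - 1) 0 + PySem.List.pyGetD (pvT m N i) ((i : Int) - 2) 0)
      = pvT m N (i + 1) := by
  have c1 : (i : Int) - 1 = ((i - 1 : Nat) : Int) := by omega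
  have c2 : (i : Int) - 2 = ((i - 2 : Nat) : Int) := by omega
  rw [c1, c2, pvT_get m N i _ (by omega), pvT_get m N i _ (by omega),
      if_pos (by omega : i - 1 < i), if_pos (by omega : i - 2 < i)]
  have hv : (if (i : Int) > m
        then pvF m (i - 1) + pvF m (i - 2) - PySem.List.pyGetD (pvT m N i) ((i : Int) - m - 1) 0
        else pvF m (i - 1) + pvF m (i - 2)) = pvF m i := by
    rw [pvF_eq m i h3]
    by_cases hc : (i : Int) > m
    · have c3 : (i : Int) - m - 1 = ((i - (m.toNat + 1) : Nat) : Int) := by omega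
      rw [if_pos hc, if_pos (by exact_mod_cast hc), c3,
          pvT_get m N i _ (by omega), if_pos (by omega : i - (m.toNat + 1) < i)]
    · rw [if_neg hc, if_neg (by exact_mod_cast hc)]
      ring
  rw [hv, PySem.List.pySetD_natCast, pvT_set m N i hiN]

lemma loopA (m : Int) (hm : 1 ≤ m) (N : Nat) (t : Nat) (ht : 3 + t ≤ N + 1) :
    (PySem.List.pyRange 3 (3 + (t : Int)) 1).foldl
      (fun r i =>
        let newborns := PySem.List.pyGetD r (i - 2) 0
        let v := PySem.List.pyGetD r (i - 1) 0 + newborns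
        let v := if i > m then v - PySem.List.pyGetD r (i - m - 1) 0 else v
        PySem.List.pySetD r i v) (pvT m N 3)
      = pvT m N (3 + t) := by
  induction t with
  | zero =>
    rw [show (3 : Int) + ((0 : Nat) : Int) = 3 by norm_num,
        PySem.List.pyRange_one_eq_nil (le_refl 3), List.foldl_nil]
  | succ t ih =>
    have hsp : (3 : Int) + ((t : Nat) + 1 : Nat) = (3 + (t : Int)) + 1 := by push_cast; ring
    rw [hsp, PySem.List.pyRange_one_succ_right (by omega : (3 : Int) ≤ 3 + (t : Int)),
        List.foldl_append, ih (by omega)]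
    have hcast : (3 : Int) + (t : Int) = ((3 + t : Nat) : Int) := by push_cast; ring
    simp only [List.foldl_cons, List.foldl_nil, hcast]
    have := stepA m hm N (3 + t) (by omega) (by omega)
    simpa using this

lemma pvBirths_step (m : Int) (t : Nat) :
    (pvD m t).reverse ++ [pvF m (t + 1)] = (pvD m (t + 1)).reverse := by
  rw [pvD_succ, List.reverse_cons]

lemma pvGet_births (m : Int) (t : Nat) (hmt : m.toNat ≤ t + 1) (hm : 1 ≤ m) :
    PySem.List.pyGetD ((pvD m (t + 1)).reverse) (((t + 1 : Nat) : Int) - m) 0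
      = pvF m (t + 2 - m.toNat) := by
  have hc : ((t + 1 : Nat) : Int) - m = ((t + 1 - m.toNat : Nat) : Int) := by omega
  rw [hc, PySem.List.pyGetD_natCast, pvD_reverse,
      PySem.List.getD_map_range _ _ _ _ (by omega : t + 1 - m.toNat < t + 1)]
  congr 1
  omega

lemma pvSum_step (m : Int) (hm : 1 ≤ m) (t : Nat) :
    ((pvD m (t + 1)).take (m.toNat - 1)).sum
      = ((pvD m t).take (m.toNat - 1)).sum + pvF m (t + 1) -
        (if (((t + 1 : Nat) : Int)) > m - 1
          then PySem.List.pyGetD ((pvD m (t + 1)).reverse) (((t + 1 : Nat) : Int) - m) 0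
          else 0) := by
  by_cases hK : m.toNat - 1 = 0
  · -- m = 1: the new cohort dies the month it is born
    rw [if_pos (by push_cast; omega), pvGet_births m t (by omega) hm, hK]
    simp [show t + 2 - m.toNat = t + 1 by omega]
  · obtain ⟨K', hKm⟩ : ∃ K', m.toNat - 1 = K' + 1 := ⟨m.toNat - 2, by omega⟩
    by_cases hc : K' + 1 ≤ t
    · rw [if_pos (by push_cast; omega), pvGet_births m t (by omega) hm,
          show t + 2 - m.toNat = t - K' by omega, hKm, pvD_succ, List.take_succ_cons,
          List.sum_cons, pvD_take_sum m t K', if_pos hc]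
      ring
    · rw [hKm, pvD_succ, List.take_succ_cons, List.sum_cons, pvD_take_sum m t K',
          if_neg hc, if_neg (by push_cast; omega)]
      ring

lemma stepB (m : Int) (hm : 1 ≤ m) (t : Nat) (x : Int) :
    pvBodyB m ((pvD m t).reverse, ((pvD m t).take (m.toNat - 1)).sum,
        pvF m (t + 1), pvF m (t + 2)) x
      = ((pvD m (t + 1)).reverse, ((pvD m (t + 1)).take (m.toNat - 1)).sum,
          pvF m (t + 1 + 1), pvF m (t + 1 + 2)) := by
  unfold pvBodyB
  simp only [pvBirths_step m t]
  have hlen : (((pvD m (t + 1)).reverse).length : Int) = ((t + 1 : Nat) : Int) := by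
    simp [pvD_length]
  rw [hlen]
  have htot : (if (((t + 1 : Nat) : Int)) > m - 1
      then ((pvD m t).take (m.toNat - 1)).sum + pvF m (t + 1) -
        PySem.List.pyGetD ((pvD m (t + 1)).reverse) (((t + 1 : Nat) : Int) - m) 0
      else ((pvD m t).take (m.toNat - 1)).sum + pvF m (t + 1))
      = ((pvD m (t + 1)).take (m.toNat - 1)).sum := by
    rw [pvSum_step m hm t]
    by_cases hc : (((t + 1 : Nat) : Int)) > m - 1
    · simp only [if_pos hc]
    · simp only [if_neg hc]; ring
  rw [htot]
  have hnew : 1 + ((pvD m (t + 1)).take (m.toNat - 1)).sum = pvF m (t + 1 + 2) := by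
    rw [← pvKey m hm (t + 1)]
  rw [hnew]

lemma loopB (m : Int) (hm : 1 ≤ m) (l : List Int) :
    ∀ (t : Nat),
      l.foldl (pvBodyB m)
        ((pvD m t).reverse, ((pvD m t).take (m.toNat - 1)).sum,
          pvF m (t + 1), pvF m (t + 2))
      = ((pvD m (t + l.length)).reverse,
          ((pvD m (t + l.length)).take (m.toNat - 1)).sum,
          pvF m (t + l.length + 1), pvF m (t + l.length + 2)) := by
  induction l with
  | nil => intro t; simp
  | cons x l ih =>
    intro t
    rw [List.foldl_cons, stepB m hm t x,
        show pvF m (t + 2) = pvF m (t + 1 + 1) from rfl, ih (t + 1)]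
    rw [show t + 1 + l.length = t + (l.length + 1) from by omega]
    simp

theorem calculate_rabbits_spec : Claim_equal_calculate_rabbits := by
  intro n m _ hpre
  obtain ⟨hn, hm⟩ := hpre
  unfold Spec_calculate_rabbits
  simp only [calculate_rabbits, calculate_rabbits_alt]
  by_cases hn1 : n = 1
  · subst hn1
    rw [PySem.List.pyRange_one_eq_nil (by norm_num : (1 : Int) + 1 ≤ 3)]
    norm_num
    decide
  · -- n ≥ 2
    have hn2 : 2 ≤ n := by omega
    obtain ⟨N, hN⟩ : ∃ N : Nat, n = (N : Int) := ⟨n.toNat, by omega⟩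
    subst hN
    have hN2 : 2 ≤ N := by exact_mod_cast hn2
    -- initial array = pvT m N 3
    have hinit :
        (if (N : Int) ≥ 2
          then PySem.List.pySetD (PySem.List.pySetD (List.replicate ((N : Int) + 1).toNat 0) 1 1) 2 1
          else PySem.List.pySetD (List.replicate ((N : Int) + 1).toNat 0) 1 1)
        = pvT m N 3 := by
      rw [if_pos (by omega)]
      have hlen : ((N : Int) + 1).toNat = N + 1 := by omega
      rw [hlen, PySem.List.pySetD_of_nonneg _ _ (by omega), PySem.List.pySetD_of_nonneg _ _ (by omega)]
      apply List.ext_getElem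
      · simp [pvT]
      · intro j h1 h2
        have hjN : j < N + 1 := by simpa using h1
        simp only [pvT, List.getElem_map, List.getElem_range, List.getElem_set,
          List.getElem_replicate]
        rcases (by omega : j = 0 ∨ j = 1 ∨ j = 2 ∨ 3 ≤ j) with h | h | h | h
        · simp [h, pvF]
        · simp [h, pvF]
        · simp [h, pvF]
        · simp [show (2:Nat) ≠ j by omega, show (1:Nat) ≠ j by omega, show ¬ (j < 3) by omega]
    rw [hinit]
    have hsplit : (N : Int) + 1 = 3 + ((N - 2 : Nat) : Int) := by
      omega
    rw [hsplit, loopA m hm N (N - 2) (by omega)]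
    -- left side value
    have hA : PySem.List.pyGetD (pvT m N (3 + (N - 2))) (N : Int) 0 = pvF m N := by
      rw [pvT_get m N _ N (le_refl N), if_pos (by omega)]
    rw [hA]
    -- right side
    have hlenR : (PySem.List.pyRange 3 (3 + ((N - 2 : Nat) : Int)) 1).length = N - 2 := by
      rw [PySem.List.length_pyRange_one]; omega
    have hB := loopB m hm (PySem.List.pyRange 3 (3 + ((N - 2 : Nat) : Int)) 1) 0
    rw [hlenR] at hB
    have hinitB : (((pvD m 0).reverse : List Int), ((pvD m 0).take (m.toNat - 1)).sum,
          pvF m (0 + 1), pvF m (0 + 2))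
        = (([] : List Int), (0 : Int), (1 : Int), (1 : Int)) := by
      simp [pvD, pvF]
    rw [hinitB] at hB
    rw [hB]
    simp only []
    congr 1
    omega
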